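-- pv_equiv track=rewrite | github.com/SamuelRosa-silva/desenvolve-python-basico | 6.3-Fatiamento/aula3_questao3.py | intervalo_maior_negativos
-- ===== SOURCE A (Python) =====
-- def intervalo_maior_negativos(lista):
--     max_negativos = 0
--     melhor_inicio = 0
--     melhor_fim = 0
--
--     #verifica todos os possíveis intervalos
--     for i in range(len(lista)):
--         for j in range(i + 1, len(lista) + 1):
--             intervalo = lista[i:j]
--             num_negativos = sum(1 for x in intervalo if x < 0)
--             if num_negativos > max_negativos:
--                 max_negativos = num_negativos
--                 melhor_inicio = i
--                 melhor_fim = j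
--
--     return melhor_inicio, melhor_fim
-- ===== SOURCE B (Python) =====
-- def intervalo_maior_negativos(lista):
--     # The maximum number of negatives in any interval is the total count,
--     # first achieved by the prefix ending just after the last negative.
--     last = -1
--     for idx, x in enumerate(lista):
--         if x < 0:
--             last = idx
--     if last < 0:
--         return 0, 0
--     return 0, last + 1
-- ===== Notes on version B (the rewrite author's own statement) =====
-- stated objective: faster
-- what changed: Replaced the O(n^3) scan of all intervals by a single pass: the maximum interval count of negatives is the total count, first attained by A at the prefix ending just after the last negative, so B just finds the index of the last negative and returns the prefix interval ending there, or the empty interval when the list has no negatives.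
import Mathlib
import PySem

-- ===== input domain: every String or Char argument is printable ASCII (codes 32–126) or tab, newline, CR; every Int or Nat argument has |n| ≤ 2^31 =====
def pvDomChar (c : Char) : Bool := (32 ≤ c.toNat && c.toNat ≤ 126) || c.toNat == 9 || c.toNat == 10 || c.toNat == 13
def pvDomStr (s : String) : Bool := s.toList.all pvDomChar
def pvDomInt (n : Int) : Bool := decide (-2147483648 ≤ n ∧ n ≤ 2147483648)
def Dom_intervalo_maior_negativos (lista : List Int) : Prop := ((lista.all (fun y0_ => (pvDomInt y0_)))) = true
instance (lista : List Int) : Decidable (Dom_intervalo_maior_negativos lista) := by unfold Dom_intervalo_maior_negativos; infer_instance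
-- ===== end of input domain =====

-- B replaces A's O(n^3) all-intervals scan by one pass: the max count is the total
-- number of negatives, first attained at the prefix ending after the last negative.


-- ===== PORT A =====
-- sum(1 for x in intervalo if x < 0)
def pvNegCount (xs : List Int) : Int :=
  xs.foldl (fun a x => if x < 0 then a + 1 else a) 0

-- the body of the inner 'for j' loop
def pvStepJ (lista : List Int) (i : Int) (st : Int × Int × Int) (j : Int) : Int × Int × Int :=
  let intervalo := PySem.List.slice lista (some i) (some j)
  let num_negativos := pvNegCount intervalo
  if num_negativos > st.1 then (num_negativos, i, j) else st

def intervalo_maior_negativos (lista : List Int) : List Int :=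
  let st :=
    (PySem.List.pyRange 0 (PySem.List.len lista) 1).foldl
      (fun st i =>
        (PySem.List.pyRange (i + 1) (PySem.List.len lista + 1) 1).foldl (pvStepJ lista i) st)
      (0, 0, 0)
  [st.2.1, st.2.2]

-- ===== PORT B =====
def intervalo_maior_negativos_alt (lista : List Int) : List Int :=
  let last :=
    (PySem.List.enumerate lista 0).foldl (fun last p => if p.2 < 0 then p.1 else last) (-1)
  if last < 0 then [0, 0] else [0, last + 1]

-- ===== PRECONDITION & SPEC =====
def Spec_intervalo_maior_negativos (lista : List Int) (out : List Int) : Prop := out = intervalo_maior_negativos_alt lista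
instance (lista : List Int) (out : List Int) : Decidable (Spec_intervalo_maior_negativos lista out) := by unfold Spec_intervalo_maior_negativos; infer_instance

-- ===== CLAIM (what is proved, stated in full; the proofs are below) =====
def Claim_equal_intervalo_maior_negativos : Prop := ∀ (lista : List Int), Dom_intervalo_maior_negativos lista → Spec_intervalo_maior_negativos lista (intervalo_maior_negativos lista)

-- ===== LEMMAS AND PROOFS =====

-- number of negatives, as a countP
def pvCnt (lista : List Int) : Int := (lista.countP (fun x => decide (x < 0)) : Int)

-- index of the last negative element, -1 if none (B's accumulator)
def pvLast (lista : List Int) : Int :=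
  (PySem.List.enumerate lista 0).foldl (fun last p => if p.2 < 0 then p.1 else last) (-1)

lemma pvNegCount_eq (xs : List Int) : pvNegCount xs = pvCnt xs := by
  unfold pvNegCount pvCnt
  rw [PySem.List.foldl_ite_add_one]; ring

lemma pvCnt_append (lista : List Int) (x : Int) :
    pvCnt (lista ++ [x]) = pvCnt lista + (if x < 0 then 1 else 0) := by
  simp only [pvCnt, List.countP_append, List.countP_cons, List.countP_nil]
  push_cast; split_ifs <;> simp_all

lemma pvCnt_nonneg (lista : List Int) : 0 ≤ pvCnt lista := by
  exact Int.natCast_nonneg _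

lemma pvLast_append (lista : List Int) (x : Int) :
    pvLast (lista ++ [x]) = if x < 0 then (lista.length : Int) else pvLast lista := by
  unfold pvLast
  rw [PySem.List.enumerate_append, List.foldl_append]
  simp [PySem.List.enumerate_cons, PySem.List.enumerate_nil]

lemma pvLast_neg_iff (lista : List Int) : pvLast lista < 0 ↔ pvCnt lista = 0 := by
  induction lista using List.reverseRecOn with
  | nil => simp [pvLast, pvCnt, PySem.List.enumerate_nil]
  | append_singleton lista x ih =>
    rw [pvLast_append, pvCnt_append]
    by_cases hx : x < 0
    · simp only [hx, if_pos]
      constructor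
      · intro h; omega
      · intro h; exfalso
        have := pvCnt_nonneg lista; simp at h; omega
    · simp only [hx, if_neg, not_false_iff]
      rw [ih]; simp

lemma pvCnt_slice_le (lista : List Int) (i j : Int) (hi : 0 ≤ i) (hj : 0 ≤ j) :
    pvCnt (PySem.List.slice lista (some i) (some j)) ≤ pvCnt lista := by
  unfold pvCnt
  rw [PySem.List.slice_toNat _ hi hj]
  have h : ((lista.drop i.toNat).take (j.toNat - i.toNat)).Sublist lista :=
    ((List.take_sublist _ _).trans (List.drop_sublist _ _))
  exact_mod_cast h.countP_le

-- the i = 0 pass of A's outer loop computes (total, 0, last+1)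
lemma pv_inner0 (lista : List Int) :
    (PySem.List.pyRange 1 ((lista.length : Int) + 1) 1).foldl (pvStepJ lista 0) (0, 0, 0)
      = if pvLast lista < 0 then ((0 : Int), (0 : Int), (0 : Int))
        else (pvCnt lista, 0, pvLast lista + 1) := by
  induction lista using List.reverseRecOn with
  | nil => decide
  | append_singleton lista x ih =>
    have hn : (((lista ++ [x]).length : Nat) : Int) = (lista.length : Int) + 1 := by
      simp
    rw [hn, PySem.List.pyRange_one_succ_right (by omega), List.foldl_append]
    have hcongr :
        (PySem.List.pyRange 1 ((lista.length : Int) + 1) 1).foldl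
            (pvStepJ (lista ++ [x]) 0) (0, 0, 0)
          = (PySem.List.pyRange 1 ((lista.length : Int) + 1) 1).foldl
              (pvStepJ lista 0) (0, 0, 0) := by
      apply PySem.List.foldl_congr_mem
      intro acc j hj
      have hjr := PySem.List.mem_pyRange_one.mp hj
      unfold pvStepJ
      simp only [PySem.List.slice_zero_start]
      rw [PySem.List.slice_to _ (by omega), PySem.List.slice_to _ (by omega)]
      rw [List.take_append_of_le_length (by omega)]
    rw [hcongr, ih]
    have hslice : PySem.List.slice (lista ++ [x]) (some 0) (some ((lista.length : Int) + 1))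
        = lista ++ [x] := by
      rw [PySem.List.slice_zero_start, PySem.List.slice_to _ (by omega)]
      have : ((lista.length : Int) + 1).toNat = (lista ++ [x]).length := by
        simp
      rw [this, List.take_length]
    by_cases hx : x < 0
    · have hlast : pvLast (lista ++ [x]) = (lista.length : Int) := by
        rw [pvLast_append]; simp [hx]
      have hcnt : pvCnt (lista ++ [x]) = pvCnt lista + 1 := by
        rw [pvCnt_append]; simp [hx]
      rw [List.foldl_cons, List.foldl_nil]
      by_cases hl : pvLast lista < 0
      · have hc0 : pvCnt lista = 0 := (pvLast_neg_iff lista).mp hl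
        rw [if_pos hl]
        simp only [pvStepJ, hslice, pvNegCount_eq, hcnt, hc0, gt_iff_lt]
        rw [if_pos (by omega), if_neg (by omega), hlast]
      · rw [if_neg hl]
        simp only [pvStepJ, hslice, pvNegCount_eq, hcnt, gt_iff_lt]
        rw [if_pos (by omega), if_neg (by omega), hlast]
    · have hlast : pvLast (lista ++ [x]) = pvLast lista := by
        rw [pvLast_append]; simp [hx]
      have hcnt : pvCnt (lista ++ [x]) = pvCnt lista := by
        rw [pvCnt_append]; simp [hx]
      rw [List.foldl_cons, List.foldl_nil]
      by_cases hl : pvLast lista < 0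
      · have hc0 : pvCnt lista = 0 := (pvLast_neg_iff lista).mp hl
        rw [if_pos hl]
        simp only [pvStepJ, hslice, pvNegCount_eq, hcnt, hc0, gt_iff_lt]
        rw [if_neg (by omega), if_pos (by omega)]
      · rw [if_neg hl]
        simp only [pvStepJ, hslice, pvNegCount_eq, hcnt, gt_iff_lt]
        rw [if_neg (by omega), if_neg (by omega), hlast]

-- once the maximum is held, no inner iteration changes the state
lemma pv_nochange (lista : List Int) (i : Int) (hi : 0 ≤ i) :
    ∀ (js : List Int) (st : Int × Int × Int), (∀ j ∈ js, 0 ≤ j) → pvCnt lista ≤ st.1 →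
      js.foldl (pvStepJ lista i) st = st := by
  intro js
  induction js with
  | nil => intro st _ _; rfl
  | cons j js ih =>
    intro st hmem hle
    have hj : 0 ≤ j := hmem j (by simp)
    have hc : pvNegCount (PySem.List.slice lista (some i) (some j)) ≤ st.1 := by
      rw [pvNegCount_eq]
      exact le_trans (pvCnt_slice_le lista i j hi hj) hle
    rw [List.foldl_cons]
    have hstep : pvStepJ lista i st j = st := by
      unfold pvStepJ
      simp only [gt_iff_lt]
      rw [if_neg (not_lt.mpr hc)]
    rw [hstep]
    exact ih st (fun j hj => hmem j (by simp [hj])) hle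

lemma pv_outer_nochange (lista : List Int) :
    ∀ (is : List Int) (st : Int × Int × Int), (∀ i ∈ is, 0 ≤ i) → pvCnt lista ≤ st.1 →
      is.foldl
        (fun st i =>
          (PySem.List.pyRange (i + 1) ((lista.length : Int) + 1) 1).foldl (pvStepJ lista i) st)
        st = st := by
  intro is
  induction is with
  | nil => intro st _ _; rfl
  | cons i is ih =>
    intro st hmem hle
    have hi : 0 ≤ i := hmem i (by simp)
    rw [List.foldl_cons,
      pv_nochange lista i hi _ st
        (fun j hj => by
          have := (PySem.List.mem_pyRange_one.mp hj).1
          omega)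
        hle]
    exact ih st (fun i hi' => hmem i (by simp [hi'])) hle

lemma pv_main (lista : List Int) (h : lista ≠ []) :
    intervalo_maior_negativos lista = intervalo_maior_negativos_alt lista := by
  unfold intervalo_maior_negativos intervalo_maior_negativos_alt
  simp only [PySem.List.len_eq]
  have hn : (0 : Int) < (lista.length : Int) := by
    have := List.length_pos_iff.mpr h
    exact_mod_cast this
  rw [PySem.List.pyRange_one_cons hn, List.foldl_cons]
  simp only [zero_add]
  rw [pv_inner0 lista]
  rw [pv_outer_nochange lista _ _
      (fun i hi => by have := (PySem.List.mem_pyRange_one.mp hi).1; omega)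
      (by
        by_cases hl : pvLast lista < 0
        · rw [if_pos hl]
          have := (pvLast_neg_iff lista).mp hl
          simp [this]
        · rw [if_neg hl])]
  have halt : (PySem.List.enumerate lista 0).foldl
      (fun last p => if p.2 < 0 then p.1 else last) (-1) = pvLast lista := rfl
  simp only [halt]
  by_cases hl : pvLast lista < 0 <;> simp [hl]

-- ===== VERDICT (by name: the statement is the Claim_ definition above) =====
theorem intervalo_maior_negativos_spec : Claim_equal_intervalo_maior_negativos := by
  intro lista _
  unfold Spec_intervalo_maior_negativos
  cases lista with
  | nil => decide
  | cons y ys => exact pv_main _ (by simp)
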